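-- pv_equiv track=rewrite | github.com/SunnerLi/tqdm_table | tqdm_table/__init__.py | __getCutLine__
-- ===== SOURCE A (Python) =====
-- def __getCutLine__(length: int = 50, width_cell: int = 10, equal_symbol: bool = True) -> str:
--     """
--         Obtain the cut line
--
--         Arg:    length          - The maximun length of the terminal
--                 width_cell      - The width of the table cell
--                 equal_symbol    - If use '=' as the symbol or not
--         Ret:    The custom cut line string
--     """
--     cut_string = "+"
--     acc_length = 0
--     while True:
--         if acc_length == 0:
--             if equal_symbol:
--                 cut_string = cut_string + '=' * (width_cell) + '+'
--             else:
--                 cut_string = cut_string + '-' * (width_cell) + '+'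
--             acc_length += width_cell
--         else:
--             if equal_symbol:
--                 cut_string = cut_string + '=' * (width_cell + 2) + '+'
--             else:
--                 cut_string = cut_string + '-' * (width_cell + 2) + '+'
--             acc_length += (width_cell + 2)
--         if acc_length >= length - width_cell:
--             break
--     return cut_string
-- ===== SOURCE B (Python) =====
-- def __getCutLine__(length: int = 50, width_cell: int = 10, equal_symbol: bool = True) -> str:
--     """Closed-form rebuild: segment count computed by ceiling division, string built by one multiplication."""
--     ch = '=' if equal_symbol else '-'
--     if 2 * width_cell >= length:
--         extra = 0
--     else:
--         extra = -((-(length - 2 * width_cell)) // (width_cell + 2))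
--     return '+' + ch * width_cell + '+' + (ch * (width_cell + 2) + '+') * extra
-- ===== Notes on version B (the rewrite author's own statement) =====
-- stated objective: simpler
-- what changed: Replaces A's accumulate-until-threshold while-loop of repeated string concatenations by a closed-form ceiling-division segment count and a single string multiplication.
-- outside the precondition, e.g. on __getCutLine__(5, 0, True): A does not finish within the time limit, B returns '++==+==+==+'; on __getCutLine__(5, -1, True): A does not finish within the time limit, B returns '++=+=+=+=+=+=+=+'; on __getCutLine__(3, -2, True): A does not finish within the time limit, B raises ZeroDivisionError
import Mathlib
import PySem

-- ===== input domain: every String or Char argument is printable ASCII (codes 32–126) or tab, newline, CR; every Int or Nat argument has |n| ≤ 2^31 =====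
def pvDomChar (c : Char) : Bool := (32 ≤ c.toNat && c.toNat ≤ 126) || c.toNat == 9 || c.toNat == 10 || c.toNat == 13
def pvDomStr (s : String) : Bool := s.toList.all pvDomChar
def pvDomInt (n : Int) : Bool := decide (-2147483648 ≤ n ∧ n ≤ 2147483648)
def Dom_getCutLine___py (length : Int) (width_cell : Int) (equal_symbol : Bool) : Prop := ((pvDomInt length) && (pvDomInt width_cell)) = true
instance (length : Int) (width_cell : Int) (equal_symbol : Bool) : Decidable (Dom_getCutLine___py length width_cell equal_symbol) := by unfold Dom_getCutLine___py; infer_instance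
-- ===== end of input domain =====

-- B replaces A's accumulate-until-threshold while-loop by a closed-form ceiling-division
-- segment count and a single string multiplication (objective: simpler decomposition).

-- ===== PORT A =====
-- '=' * n / '-' * n (Python: non-positive n gives the empty string)
def pyStrMul (c : Char) (n : Int) : String := String.mk (List.replicate n.toNat c)

-- the 'while True' loop of A; fuel only makes it total, it is never exhausted on Pre_ inputs
def getCutLineLoop (length : Int) (width_cell : Int) (equal_symbol : Bool) :
    Nat → Int → String → String
  | 0, _, cut_string => cut_string
  | fuel+1, acc_length, cut_string =>
    if acc_length = 0 then
      let cut' := if equal_symbol then cut_string ++ pyStrMul '=' width_cell ++ "+"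
                  else cut_string ++ pyStrMul '-' width_cell ++ "+"
      let acc' := acc_length + width_cell
      if acc' ≥ length - width_cell then cut'
      else getCutLineLoop length width_cell equal_symbol fuel acc' cut'
    else
      let cut' := if equal_symbol then cut_string ++ pyStrMul '=' (width_cell + 2) ++ "+"
                  else cut_string ++ pyStrMul '-' (width_cell + 2) ++ "+"
      let acc' := acc_length + (width_cell + 2)
      if acc' ≥ length - width_cell then cut'
      else getCutLineLoop length width_cell equal_symbol fuel acc' cut'

def getCutLine___py (length : Int) (width_cell : Int) (equal_symbol : Bool) : String :=
  getCutLineLoop length width_cell equal_symbol ((length - 2 * width_cell).toNat + 2) 0 "+"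

-- ===== PORT B =====
-- Python '(block) * extra'
def strTimes (s : String) : Nat → String
  | 0 => ""
  | n+1 => s ++ strTimes s n

def getCutLine___py_alt (length : Int) (width_cell : Int) (equal_symbol : Bool) : String :=
  let ch := if equal_symbol then '=' else '-'
  let extra : Int :=
    if 2 * width_cell ≥ length then 0
    else -(PySem.Int.floordiv (-(length - 2 * width_cell)) (width_cell + 2))
  "+" ++ pyStrMul ch width_cell ++ "+" ++ strTimes (pyStrMul ch (width_cell + 2) ++ "+") extra.toNat

-- ===== PRECONDITION & SPEC =====
-- Pre_ admits EXACTLY the inputs on which A's 'while True' loop terminates (A never raises;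
-- outside Pre_ it returns nothing at all).  Why this is the termination set: with width_cell ≥ 1
-- acc_length strictly increases and reaches the threshold; with width_cell = 0 acc_length stays 0
-- forever (the acc_length == 0 branch repeats), with width_cell = -1 it oscillates -1,0,-1,0,…,
-- and with width_cell ≤ -2 it never increases — so for width_cell ≤ 0 the loop returns only when
-- the break fires at the first check (2*width_cell ≥ length) or, in the one oscillation corner
-- (width_cell, length) = (-1, -1), at the second (verified against the Python; see the cites,
-- e.g. A diverges on (5, 0, True) and (5, -1, True)).
def Pre_getCutLine___py (length : Int) (width_cell : Int) (equal_symbol : Bool) : Prop :=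
  1 ≤ width_cell ∨ 2 * width_cell ≥ length ∨ (width_cell = -1 ∧ length = -1)
instance (length : Int) (width_cell : Int) (equal_symbol : Bool) : Decidable (Pre_getCutLine___py length width_cell equal_symbol) := by unfold Pre_getCutLine___py; infer_instance

def pvWitness_getCutLine___py : Int × Int × Bool := (50, 10, true)

def Spec_getCutLine___py (length : Int) (width_cell : Int) (equal_symbol : Bool) (out : String) : Prop := out = getCutLine___py_alt length width_cell equal_symbol
instance (length : Int) (width_cell : Int) (equal_symbol : Bool) (out : String) : Decidable (Spec_getCutLine___py length width_cell equal_symbol out) := by unfold Spec_getCutLine___py; infer_instance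

-- ===== CLAIM (what is proved, stated in full; the proofs are below) =====
def Claim_equal_getCutLine___py : Prop := ∀ (length : Int) (width_cell : Int) (equal_symbol : Bool), Dom_getCutLine___py length width_cell equal_symbol → Pre_getCutLine___py length width_cell equal_symbol → Spec_getCutLine___py length width_cell equal_symbol (getCutLine___py length width_cell equal_symbol)

-- ===== LEMMAS AND PROOFS =====

theorem strTimes_succ (s : String) (n : Nat) : strTimes s (n+1) = s ++ strTimes s n := rfl

theorem if_block_eq (e : Bool) (s : String) (n : Int) :
    (if e then s ++ pyStrMul '=' n ++ "+" else s ++ pyStrMul '-' n ++ "+")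
      = s ++ pyStrMul (if e then '=' else '-') n ++ "+" := by
  cases e <;> rfl

-- the loop, entered with acc_length ≠ 0 and still k steps (k ≥ 1) below the threshold,
-- appends exactly k blocks
theorem loop_appends (length width_cell : Int) (e : Bool) (k : Nat) :
    ∀ (fuel : Nat) (acc : Int) (s : String),
      1 ≤ width_cell → 1 ≤ acc →
      1 ≤ k → k ≤ fuel →
      length - width_cell ≤ acc + k * (width_cell + 2) →
      acc + (k - 1 : Nat) * (width_cell + 2) < length - width_cell →
      getCutLineLoop length width_cell e fuel acc s
        = s ++ strTimes (pyStrMul (if e then '=' else '-') (width_cell + 2) ++ "+") k := by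
  induction k with
  | zero => intro _ _ _ _ _ hk; omega
  | succ n ih =>
    intro fuel acc s hw haccpos _ hfuel hhi hlo
    have hacc : acc ≠ 0 := by omega
    obtain ⟨m, rfl⟩ : ∃ m, fuel = m + 1 := ⟨fuel - 1, by omega⟩
    have hlo' : acc + (n : Int) * (width_cell + 2) < length - width_cell := by
      simpa using hlo
    have hhi' : length - width_cell ≤ acc + ((n : Int) + 1) * (width_cell + 2) := by
      push_cast at hhi; linarith
    simp only [getCutLineLoop, if_neg hacc, if_block_eq]
    by_cases hstop : acc + (width_cell + 2) ≥ length - width_cell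
    · rw [if_pos hstop]
      have hn : n = 0 := by
        by_contra h
        have h1 : (1:Int) * (width_cell + 2) ≤ (n : Int) * (width_cell + 2) := by
          apply mul_le_mul_of_nonneg_right
          · exact_mod_cast Nat.one_le_iff_ne_zero.mpr h
          · omega
        linarith
      subst hn
      simp [strTimes, String.append_assoc]
    · rw [if_neg hstop]
      push_neg at hstop
      have hn : 1 ≤ n := by
        by_contra h
        have hn0 : n = 0 := by omega
        subst hn0
        simp at hhi'
        linarith
      have hcast : ((n - 1 : Nat) : Int) = (n : Int) - 1 := by omega
      rw [ih m (acc + (width_cell + 2)) _ hw (by omega) hn (by omega)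
            (by push_cast; linarith)
            (by rw [hcast]; have : acc + (width_cell + 2) + ((n : Int) - 1) * (width_cell + 2)
                  = acc + (n : Int) * (width_cell + 2) := by ring
                linarith)]
      rw [strTimes_succ]
      simp [String.append_assoc]

-- one unrolling of the loop from the initial state (acc_length = 0)
theorem loop_first (length width_cell : Int) (e : Bool) (m : Nat) :
    getCutLineLoop length width_cell e (m+1) 0 "+" =
      if 0 + width_cell ≥ length - width_cell
      then "+" ++ pyStrMul (if e then '=' else '-') width_cell ++ "+"
      else getCutLineLoop length width_cell e m (0 + width_cell)
             ("+" ++ pyStrMul (if e then '=' else '-') width_cell ++ "+") := by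
  simp only [getCutLineLoop, if_block_eq]
  simp only [if_true]

-- ===== VERDICT (by name: the statement is the Claim_ definition above) =====
theorem getCutLine___py_spec : Claim_equal_getCutLine___py := by
  intro length width_cell e _ hpre
  show getCutLine___py length width_cell e = getCutLine___py_alt length width_cell e
  by_cases h1 : 2 * width_cell ≥ length
  · -- the very first block already reaches the threshold: one segment on both sides
    have ha : (length - 2 * width_cell).toNat = 0 := by omega
    unfold getCutLine___py getCutLine___py_alt
    rw [ha]
    have hfuel : (0 : Nat) + 2 = 1 + 1 := rfl
    rw [hfuel, loop_first]
    rw [if_pos (by omega : (0:Int) + width_cell ≥ length - width_cell), if_pos h1]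
    simp [strTimes, String.append_assoc]
  · by_cases h2 : 1 ≤ width_cell
    · -- general case: the loop runs 1 + extra iterations
      have hb : (0:Int) < width_cell + 2 := by omega
      have hagt : (0:Int) < length - 2 * width_cell := by omega
      set a : Int := length - 2 * width_cell with hadef
      set extra : Int := -(PySem.Int.floordiv (-a) (width_cell + 2)) with hex
      have hbnd : (extra - 1) * (width_cell + 2) < a ∧ a ≤ extra * (width_cell + 2) :=
        (PySem.Int.neg_floordiv_neg_eq_iff_of_pos hb).mp rfl
      have hex1 : 1 ≤ extra := by nlinarith [hbnd.2]
      have hexle : extra ≤ a := by nlinarith [hbnd.1]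
      have hcast : ((extra.toNat : Int)) = extra := Int.toNat_of_nonneg (by omega)
      have hcast1 : ((extra.toNat - 1 : Nat) : Int) = extra - 1 := by omega
      unfold getCutLine___py getCutLine___py_alt
      rw [if_neg h1]
      have hfuel : a.toNat + 2 = (a.toNat + 1) + 1 := rfl
      rw [← hadef, hfuel, loop_first]
      rw [if_neg (by omega : ¬ ((0:Int) + width_cell ≥ length - width_cell))]
      rw [loop_appends length width_cell e extra.toNat (a.toNat + 1) (0 + width_cell) _
            h2 (by omega) (by omega) (by omega)
            (by rw [hcast]; nlinarith [hbnd.2])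
            (by rw [hcast1]; nlinarith [hbnd.1])]
    · -- the isolated returning point (width_cell, length) = (-1, -1)
      have hw : width_cell = -1 ∧ length = -1 := by
        rcases hpre with h | h | h
        · omega
        · omega
        · exact ⟨h.1, h.2⟩
      obtain ⟨rfl, rfl⟩ := hw
      cases e <;> decide
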